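-- pv_equiv track=rewrite | github.com/maximodariosalvagno/Algoritmos_2026 | Ejercicio22.py | usar_la_fuerza
-- ===== SOURCE A (Python) =====
-- def usar_la_fuerza(mochila, indice):
--
--     if indice >= len(mochila):
--         return False, 0
--
--     objeto_actual = mochila[indice]
--
--     if objeto_actual == "sable de luz":
--         return True, 1
--     encontrado, cantidad = usar_la_fuerza(mochila, indice + 1)
--
--     if encontrado:
--         return True, cantidad + 1
--     else:
--         return False, 0
-- ===== SOURCE B (Python) =====
-- def usar_la_fuerza(mochila, indice):
--     for i in range(indice, len(mochila)):
--         if mochila[i] == "sable de luz":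
--             return True, i - indice + 1
--     return False, 0
-- ===== Notes on version B (the rewrite author's own statement) =====
-- stated objective: simpler
-- what changed: Replaces the recursion (which rebuilds the count on the way back up) with a single forward loop over range(indice, len(mochila)) that returns i - indice + 1 arithmetically at the first match.
import Mathlib
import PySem

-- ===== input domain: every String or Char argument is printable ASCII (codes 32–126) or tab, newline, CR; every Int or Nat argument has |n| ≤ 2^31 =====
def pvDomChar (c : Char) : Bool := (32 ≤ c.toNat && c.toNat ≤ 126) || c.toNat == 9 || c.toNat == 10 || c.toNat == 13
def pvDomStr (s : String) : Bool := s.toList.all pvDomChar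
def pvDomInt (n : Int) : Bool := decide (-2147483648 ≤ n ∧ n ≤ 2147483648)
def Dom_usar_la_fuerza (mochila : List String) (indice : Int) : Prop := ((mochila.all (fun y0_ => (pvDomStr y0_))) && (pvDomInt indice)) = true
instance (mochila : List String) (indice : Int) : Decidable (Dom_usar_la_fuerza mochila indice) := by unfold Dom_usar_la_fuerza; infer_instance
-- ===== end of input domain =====

-- B replaces A's recursion with one forward loop returning the distance arithmetically (simpler, constant space).

-- ===== PORT A =====
-- literal transliteration of A's recursion; the `none` branch is Python's IndexError (excluded by Pre_)
def usar_la_fuerza (mochila : List String) (indice : Int) : Bool × Int :=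
  if (mochila.length : Int) ≤ indice then (false, 0)
  else
    match PySem.List.pyGet? mochila indice with
    | none => (false, 0)
    | some objeto_actual =>
      if objeto_actual = "sable de luz" then (true, 1)
      else
        let r := usar_la_fuerza mochila (indice + 1)
        if r.1 then (true, r.2 + 1) else (false, 0)
termination_by ((mochila.length : Int) - indice).toNat
decreasing_by omega

-- ===== PORT B =====
-- the for-loop of Source B over range(indice, len(mochila)); `none` is Python's IndexError (excluded by Pre_)
def usar_la_fuerza_altLoop (mochila : List String) (indice : Int) : List Int → Bool × Int
  | [] => (false, 0)
  | i :: rest =>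
    match PySem.List.pyGet? mochila i with
    | none => (false, 0)
    | some obj =>
      if obj = "sable de luz" then (true, i - indice + 1)
      else usar_la_fuerza_altLoop mochila indice rest

def usar_la_fuerza_alt (mochila : List String) (indice : Int) : Bool × Int :=
  usar_la_fuerza_altLoop mochila indice (PySem.List.pyRange indice (mochila.length : Int) 1)

-- ===== PRECONDITION & SPEC =====
-- Pre_ excludes exactly the inputs where Python's mochila[indice] raises IndexError: indice < -len(mochila).
def Pre_usar_la_fuerza (mochila : List String) (indice : Int) : Prop :=
  -(mochila.length : Int) ≤ indice
instance (mochila : List String) (indice : Int) : Decidable (Pre_usar_la_fuerza mochila indice) := by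
  unfold Pre_usar_la_fuerza; infer_instance

def pvWitness_usar_la_fuerza : List String × Int := (["palo", "sable de luz"], 0)

def Spec_usar_la_fuerza (mochila : List String) (indice : Int) (out : Bool × Int) : Prop := out = usar_la_fuerza_alt mochila indice
instance (mochila : List String) (indice : Int) (out : Bool × Int) : Decidable (Spec_usar_la_fuerza mochila indice out) := by unfold Spec_usar_la_fuerza; infer_instance

-- ===== CLAIM (what is proved, stated in full; the proofs are below) =====
def Claim_equal_usar_la_fuerza : Prop := ∀ (mochila : List String) (indice : Int), Dom_usar_la_fuerza mochila indice → Pre_usar_la_fuerza mochila indice → Spec_usar_la_fuerza mochila indice (usar_la_fuerza mochila indice)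

-- ===== LEMMAS AND PROOFS =====

-- shifting the loop's base index by one adds one to the reported distance (and not-found stays (false,0))
theorem altLoop_shift (mochila : List String) (a : Int) (l : List Int) :
    usar_la_fuerza_altLoop mochila a l =
      (let r := usar_la_fuerza_altLoop mochila (a + 1) l
       if r.1 then (true, r.2 + 1) else (false, 0)) := by
  induction l with
  | nil => simp [usar_la_fuerza_altLoop]
  | cons i rest ih =>
    simp only [usar_la_fuerza_altLoop]
    cases h : PySem.List.pyGet? mochila i with
    | none => simp
    | some obj =>
      by_cases hs : obj = "sable de luz"
      · simp [hs]; ring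
      · simp [hs, ih]

theorem usar_la_fuerza_eq_alt (mochila : List String) (indice : Int) :
    usar_la_fuerza mochila indice = usar_la_fuerza_alt mochila indice := by
  rw [usar_la_fuerza_alt]
  by_cases hle : (mochila.length : Int) ≤ indice
  · rw [usar_la_fuerza, PySem.List.pyRange_one_eq_nil hle]
    simp [hle, usar_la_fuerza_altLoop]
  · have hlt : indice < (mochila.length : Int) := lt_of_not_ge hle
    rw [usar_la_fuerza, PySem.List.pyRange_one_cons hlt]
    simp only [hle, if_false]
    cases h : PySem.List.pyGet? mochila indice with
    | none => simp [usar_la_fuerza_altLoop, h]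
    | some obj =>
      simp only [usar_la_fuerza_altLoop, h]
      by_cases hs : obj = "sable de luz"
      · simp [hs]
      · simp only [hs, if_false]
        rw [usar_la_fuerza_eq_alt mochila (indice + 1), usar_la_fuerza_alt,
            altLoop_shift mochila indice (PySem.List.pyRange (indice + 1) (mochila.length : Int) 1)]
termination_by ((mochila.length : Int) - indice).toNat
decreasing_by omega

-- ===== VERDICT (by name: the statement is the Claim_ definition above) =====
theorem usar_la_fuerza_spec : Claim_equal_usar_la_fuerza := by
  intro mochila indice _ _
  unfold Spec_usar_la_fuerza
  exact usar_la_fuerza_eq_alt mochila indice
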